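-- pv_equiv track=rewrite | github.com/Adnanture/Test | task1/task1.py | build_massiv
-- ===== SOURCE A (Python) =====
-- def build_massiv(n, m):
--     massiv = []
--     start = 0
--     while True:
--         massiv.append(str(start + 1))
--         start = (start + m - 1) % n
--         if start == 0:
--             break
--     return ''.join(massiv)
-- ===== SOURCE B (Python) =====
-- def build_massiv(n, m):
--     # closed-form generation: step d, cycle length |n|//gcd, each entry by direct multiplication mod n
--     d = (m - 1) % n
--     g, x = abs(n), abs(d)
--     while x:
--         g, x = x, g % x
--     return ''.join(str(k * d % n + 1) for k in range(abs(n) // g))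
-- ===== Notes on version B (the rewrite author's own statement) =====
-- stated objective: alternative
-- what changed: B replaces A's incremental accumulate-until-return-to-zero while-loop by computing the step d=(m-1)%n, the exact cycle length |n|//gcd(|n|,|d|) via Euclid, and generating each entry directly as k*d%n+1 over a range.
import Mathlib
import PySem

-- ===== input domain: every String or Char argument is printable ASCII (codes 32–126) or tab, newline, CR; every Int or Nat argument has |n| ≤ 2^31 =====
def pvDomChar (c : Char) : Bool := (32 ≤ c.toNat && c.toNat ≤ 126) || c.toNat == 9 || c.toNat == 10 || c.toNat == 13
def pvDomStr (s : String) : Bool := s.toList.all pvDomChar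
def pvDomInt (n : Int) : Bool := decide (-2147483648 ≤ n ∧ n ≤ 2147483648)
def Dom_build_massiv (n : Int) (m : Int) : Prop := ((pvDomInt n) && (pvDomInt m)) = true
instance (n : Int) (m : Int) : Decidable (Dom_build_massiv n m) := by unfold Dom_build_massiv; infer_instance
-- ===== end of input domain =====

-- B replaces A's accumulate-until-zero while-loop with a closed-form generation: step d = (m-1) % n,
-- cycle length |n| // gcd(|n|, |d|) (Euclid), each entry produced directly as k*d % n + 1.


-- ===== PORT A =====
-- A's `while True` loop, totalized with fuel |n| (sufficient under Pre_, proved below; the fuel-0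
-- branch is unreachable). Same state: the string list `acc`, the integer `start`.
def build_massiv_loop (n m : Int) : Nat → Int → List String → String
  | 0, _, acc => PySem.Str.join "" acc
  | fuel+1, start, acc =>
      let acc2 := acc ++ [PySem.Int.toStr (start + 1)]
      let start2 := PySem.Int.mod (start + m - 1) n
      if start2 = 0 then PySem.Str.join "" acc2
      else build_massiv_loop n m fuel start2 acc2

def build_massiv (n : Int) (m : Int) : String :=
  build_massiv_loop n m n.natAbs 0 []

-- ===== PORT B =====
-- Source B's Euclid loop: while x: g, x = x, g % x
def pyGcdLoop (g x : Nat) : Nat :=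
  if h : x = 0 then g else pyGcdLoop x (g % x)
termination_by x
decreasing_by exact Nat.mod_lt _ (Nat.pos_of_ne_zero h)

def build_massiv_alt (n : Int) (m : Int) : String :=
  let d := PySem.Int.mod (m - 1) n
  let g := pyGcdLoop n.natAbs d.natAbs
  PySem.Str.join "" ((PySem.List.pyRange 0 ((n.natAbs / g : Nat) : Int) 1).map
    (fun k => PySem.Int.toStr (PySem.Int.mod (k * d) n + 1)))

-- ===== PRECONDITION & SPEC =====
-- A computes `% n` at once; on n = 0 Python raises ZeroDivisionError, so Pre_ excludes exactly n = 0.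
def Pre_build_massiv (n : Int) (m : Int) : Prop := n ≠ 0
instance (n : Int) (m : Int) : Decidable (Pre_build_massiv n m) := by unfold Pre_build_massiv; infer_instance
def pvWitness_build_massiv : Int × Int := (5, 3)
def Spec_build_massiv (n : Int) (m : Int) (out : String) : Prop := out = build_massiv_alt n m
instance (n : Int) (m : Int) (out : String) : Decidable (Spec_build_massiv n m out) := by unfold Spec_build_massiv; infer_instance

-- ===== CLAIM (what is proved, stated in full; the proofs are below) =====
def Claim_equal_build_massiv : Prop := ∀ (n : Int) (m : Int), Dom_build_massiv n m → Pre_build_massiv n m → Spec_build_massiv n m (build_massiv n m)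

-- ===== LEMMAS AND PROOFS =====

-- proof-side abbreviations: the step d, the gcd g, the cycle length L, the k-th loop state s k
def pvD (n m : Int) : Int := PySem.Int.mod (m - 1) n
def pvG (n m : Int) : Nat := Nat.gcd n.natAbs (pvD n m).natAbs
def pvL (n m : Int) : Nat := n.natAbs / pvG n m
def pvS (n m : Int) (k : Nat) : Int := PySem.Int.mod ((k : Int) * pvD n m) n

theorem pv_mod_eq_fmod (a n : Int) : PySem.Int.mod a n = Int.fmod a n := rfl

theorem pyGcdLoop_eq (x g : Nat) : pyGcdLoop g x = Nat.gcd x g := by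
  induction x using Nat.strong_induction_on generalizing g with
  | _ x ih =>
    rw [pyGcdLoop]
    split
    · subst ‹x = 0›; simp
    · rw [ih (g % x) (Nat.mod_lt _ (Nat.pos_of_ne_zero ‹x ≠ 0›)) x]
      exact (Nat.gcd_rec x g).symm

theorem nat_dvd_mul_iff (a b k : Nat) (ha : 0 < a) : a ∣ k * b ↔ (a / Nat.gcd a b) ∣ k := by
  set g := Nat.gcd a b with hg
  have hgpos : 0 < g := Nat.gcd_pos_of_pos_left b ha
  obtain ⟨a', ha'⟩ : g ∣ a := Nat.gcd_dvd_left a b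
  obtain ⟨b', hb'⟩ : g ∣ b := Nat.gcd_dvd_right a b
  have hadiv : a / g = a' := by rw [ha', Nat.mul_div_cancel_left _ hgpos]
  have hbdiv : b / g = b' := by rw [hb', Nat.mul_div_cancel_left _ hgpos]
  have hcop : Nat.Coprime a' b' := by
    have := Nat.coprime_div_gcd_div_gcd (m := a) (n := b) hgpos
    rwa [← hg, hadiv, hbdiv] at this
  rw [hadiv]
  constructor
  · intro h
    have h2 : g * a' ∣ g * (k * b') := by
      rw [← ha'] at *
      calc a ∣ k * b := h
        _ = g * (k * b') := by rw [hb']; ring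
    exact hcop.dvd_of_dvd_mul_right ((Nat.mul_dvd_mul_iff_left hgpos).mp h2)
  · intro h
    calc a = g * a' := ha'
      _ ∣ g * (k * b') := Nat.mul_dvd_mul_left g (Dvd.dvd.mul_right h _)
      _ = k * b := by rw [hb']; ring

theorem pvS_eq_zero_iff (n m : Int) (hn : n ≠ 0) (k : Nat) :
    pvS n m k = 0 ↔ pvL n m ∣ k := by
  unfold pvS pvL pvG
  rw [pv_mod_eq_fmod, ← Int.dvd_iff_fmod_eq_zero, ← Int.natAbs_dvd_natAbs,
    Int.natAbs_mul, Int.natAbs_natCast]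
  exact nat_dvd_mul_iff n.natAbs (pvD n m).natAbs k (Int.natAbs_pos.mpr hn)

theorem pvL_pos (n m : Int) (hn : n ≠ 0) : 0 < pvL n m := by
  unfold pvL pvG
  have ha : 0 < n.natAbs := Int.natAbs_pos.mpr hn
  exact Nat.div_pos (Nat.le_of_dvd ha (Nat.gcd_dvd_left _ _)) (Nat.gcd_pos_of_pos_left _ ha)

theorem pvL_le (n m : Int) : pvL n m ≤ n.natAbs := Nat.div_le_self _ _

theorem pvS_zero (n m : Int) : pvS n m 0 = 0 := by
  unfold pvS; rw [pv_mod_eq_fmod]; norm_num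

theorem fmod_add_left_fmod (n a b : Int) : ((a.fmod n) + b).fmod n = (a + b).fmod n := by
  rw [Int.add_fmod, Int.fmod_fmod, ← Int.add_fmod]

theorem fmod_add_right_fmod (n a b : Int) : (a + (b.fmod n)).fmod n = (a + b).fmod n := by
  rw [Int.add_fmod, Int.fmod_fmod, ← Int.add_fmod]

theorem pvS_step (n m : Int) (k : Nat) :
    PySem.Int.mod (pvS n m k + m - 1) n = pvS n m (k + 1) := by
  unfold pvS pvD
  rw [pv_mod_eq_fmod, pv_mod_eq_fmod, pv_mod_eq_fmod]
  have h1 : (↑k * (m - 1 : Int).fmod n).fmod n + m - 1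
      = ((↑k * ((m - 1 : Int).fmod n)).fmod n) + (m - 1) := by ring
  rw [h1, fmod_add_left_fmod, ← fmod_add_right_fmod]
  congr 1
  push_cast
  ring

-- the loop, started at state s j with j < L and enough fuel, appends the entries j..L-1 and stops
theorem loop_char (n m : Int) (hn : n ≠ 0) :
    ∀ (fuel j : Nat) (acc : List String), j < pvL n m → pvL n m - j ≤ fuel →
      build_massiv_loop n m fuel (pvS n m j) acc
        = PySem.Str.join "" (acc ++ (List.range (pvL n m - j)).map
            (fun i => PySem.Int.toStr (pvS n m (j + i) + 1))) := by
  intro fuel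
  induction fuel with
  | zero => intro j acc hj hf; omega
  | succ fuel ih =>
    intro j acc hj hf
    rw [build_massiv_loop]
    simp only [pvS_step n m j]
    by_cases h0 : pvS n m (j + 1) = 0
    · rw [if_pos h0]
      have hdvd : pvL n m ∣ j + 1 := (pvS_eq_zero_iff n m hn (j + 1)).mp h0
      have hL : j + 1 = pvL n m := by
        rcases hdvd with ⟨c, hc⟩
        rcases Nat.eq_zero_or_pos c with rfl | hc1
        · omega
        · have : pvL n m ≤ j + 1 := by
            calc pvL n m = pvL n m * 1 := (Nat.mul_one _).symm
              _ ≤ pvL n m * c := Nat.mul_le_mul_left _ hc1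
              _ = j + 1 := hc.symm
          omega
      have : pvL n m - j = 1 := by omega
      rw [this]
      simp
    · rw [if_neg h0]
      have hne : j + 1 ≠ pvL n m := by
        intro hcontra
        exact h0 ((pvS_eq_zero_iff n m hn (j + 1)).mpr (hcontra ▸ dvd_refl _))
      have hj1 : j + 1 < pvL n m := by omega
      rw [ih (j + 1) _ hj1 (by omega)]
      congr 1
      have hsplit : pvL n m - j = (pvL n m - (j + 1)) + 1 := by omega
      have hmap : List.map (fun i => PySem.Int.toStr (pvS n m (j + 1 + i) + 1))
            (List.range (pvL n m - (j + 1)))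
          = List.map ((fun i => PySem.Int.toStr (pvS n m (j + i) + 1)) ∘ Nat.succ)
            (List.range (pvL n m - (j + 1))) := by
        apply List.map_congr_left
        intro i _
        simp only [Function.comp_apply, Nat.succ_eq_add_one]
        have hidx : j + 1 + i = j + (i + 1) := by omega
        rw [hidx]
      rw [hsplit, List.range_succ_eq_map, List.map_cons, List.map_map, hmap]
      simp

theorem build_massiv_eq (n m : Int) (hn : n ≠ 0) :
    build_massiv n m = PySem.Str.join ""
      ((List.range (pvL n m)).map (fun i => PySem.Int.toStr (pvS n m i + 1))) := by
  unfold build_massiv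
  have h0 := pvS_zero n m
  rw [← h0, loop_char n m hn n.natAbs 0 [] (pvL_pos n m hn)
    (by have := pvL_le n m; omega)]
  simp

theorem build_massiv_alt_eq (n m : Int) (hn : n ≠ 0) :
    build_massiv_alt n m = PySem.Str.join ""
      ((List.range (pvL n m)).map (fun i => PySem.Int.toStr (pvS n m i + 1))) := by
  unfold build_massiv_alt
  simp only []
  have hg : pyGcdLoop n.natAbs (pvD n m).natAbs = pvG n m := by
    rw [pyGcdLoop_eq, Nat.gcd_comm]; rfl
  rw [show PySem.Int.mod (m - 1) n = pvD n m from rfl, hg,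
    show n.natAbs / pvG n m = pvL n m from rfl]
  rw [PySem.List.pyRange_one]
  have htn : (((pvL n m : Int)) - 0).toNat = pvL n m := by simp
  rw [htn, List.map_map]
  congr 1
  apply List.map_congr_left
  intro i _
  simp only [Function.comp_apply, zero_add]
  rfl

-- ===== VERDICT (by name: the statement is the Claim_ definition above) =====
theorem build_massiv_spec : Claim_equal_build_massiv := by
  intro n m _ hpre
  unfold Spec_build_massiv
  rw [build_massiv_eq n m hpre, build_massiv_alt_eq n m hpre]
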